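-- pv_equiv track=rewrite | github.com/anders-ahsman/advent-of-code | 2019/day16/main.py | calc_digits
-- ===== SOURCE A (Python) =====
-- def calc_digits(digits, count):
--     for _ in range(count):
--         digits_copy = digits[:]
--         for i in range(len(digits)):
--             it = get_pattern_iter(i + 1)
--             digit_sum = 0
--             for j in range(len(digits)):
--                 digit_sum += digits_copy[j] * next(it)
--             digits[i] = int(str(digit_sum)[-1])
--     return ''.join([str(d) for d in digits[0:8]])
--
-- def get_pattern_iter(repeat_target):
--     digits = (0, 1, 0, -1)
--     pos = 0
--     repeat_count = 0
--     digit = digits[pos]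
--     is_first = True
--     while True:
--         if is_first:
--             is_first = False
--         else:
--             yield digit
--
--         repeat_count += 1
--         if repeat_count >= repeat_target:
--             repeat_count = 0
--             pos = (pos + 1) % len(digits)
--             digit = digits[pos]
-- ===== SOURCE B (Python) =====
-- def calc_digits(digits, count):
--     # Prefix-sum FFT: each output digit sums O(n/r) signed blocks via prefix sums
--     # instead of an O(n) generator walk, so a phase costs O(n log n) not O(n^2).
--     # Equivalence is about the return value; like A, this updates `digits` in place.
--     n = len(digits)
--     for _ in range(count):
--         prefix = [0]
--         acc = 0
--         for d in digits:
--             acc += d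
--             prefix.append(acc)
--         out = []
--         for i in range(n):
--             r = i + 1
--             s = 0
--             sign = 1
--             start = r - 1
--             while start < n:
--                 s += sign * (prefix[min(start + r, n)] - prefix[start])
--                 sign = -sign
--                 start += 2 * r
--             out.append(abs(s) % 10)
--         digits[:] = out
--     return ''.join(str(d) for d in digits[:8])
-- ===== Notes on version B (the rewrite author's own statement) =====
-- stated objective: faster
-- what changed: Replaces the per-digit stateful pattern-generator walk (O(n) multiplies per digit) with prefix sums: each output digit is computed as O(n/(i+1)) signed block-range sums, and the last-digit step int(str(s)[-1]) becomes abs(s)%10.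
import Mathlib
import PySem

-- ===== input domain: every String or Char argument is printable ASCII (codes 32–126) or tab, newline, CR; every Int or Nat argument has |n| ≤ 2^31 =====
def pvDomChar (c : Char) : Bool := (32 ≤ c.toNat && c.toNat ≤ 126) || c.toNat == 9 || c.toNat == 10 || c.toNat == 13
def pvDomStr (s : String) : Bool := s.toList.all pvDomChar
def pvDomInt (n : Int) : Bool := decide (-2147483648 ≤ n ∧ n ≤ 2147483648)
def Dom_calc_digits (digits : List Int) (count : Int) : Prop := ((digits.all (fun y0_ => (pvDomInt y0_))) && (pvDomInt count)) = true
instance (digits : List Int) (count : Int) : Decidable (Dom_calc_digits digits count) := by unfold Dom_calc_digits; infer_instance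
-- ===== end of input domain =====

-- B replaces A's per-digit pattern-generator walk by prefix sums (signed block-range sums);
-- equivalence is about the RETURN value (both Pythons also mutate `digits` to the same final content).

-- ===== PORT A =====

-- the tuple (0, 1, 0, -1) of get_pattern_iter
def patA (pos : Nat) : Int := if pos = 0 then 0 else if pos = 1 then 1 else if pos = 2 then 0 else -1

-- one call of next(it): the generator advances its state once, then yields the current digit
def iterNextA (target : Nat) (s : Nat × Nat × Int) : (Nat × Nat × Int) × Int :=
  let pos := s.1
  let rc := s.2.1 + 1
  if rc ≥ target then
    let pos := (pos + 1) % 4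
    ((pos, 0, patA pos), patA pos)
  else ((pos, rc, s.2.2), s.2.2)

-- inner j-loop: digit_sum += digits_copy[j] * next(it)
def rowA (copy : List Int) (i : Nat) : Int :=
  ((List.range copy.length).foldl
    (fun (acc : Int × (Nat × Nat × Int)) j =>
      let r := iterNextA (i + 1) acc.2
      (acc.1 + copy.getD j 0 * r.2, r.1))
    (0, (0, 0, patA 0))).1

-- digits[i] = int(str(digit_sum)[-1])
def lastDigitA (s : Int) : Int :=
  match PySem.List.pyGet? (PySem.Int.toChars s) (-1) with
  | some c => (PySem.Int.ofChars? [c]).getD 0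
  | none => 0

-- one phase: digits_copy = digits[:]; for i in range(len(digits)): digits[i] = ...
def phaseA (digits : List Int) : List Int :=
  let copy := digits
  (List.range digits.length).foldl (fun d i => d.set i (lastDigitA (rowA copy i))) digits

-- for _ in range(count)
def loopA : Nat → List Int → List Int
  | 0, d => d
  | k + 1, d => loopA k (phaseA d)

def calc_digits (digits : List Int) (count : Int) : String :=
  let final := loopA count.toNat digits
  PySem.Str.join "" ((PySem.List.slice final (some 0) (some 8)).map PySem.Int.toStr)

-- ===== PORT B =====

-- prefix = [0]; acc = 0; for d in digits: acc += d; prefix.append(acc)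
def prefixB (digits : List Int) : List Int :=
  (digits.foldl (fun (st : List Int × Int) d => (st.1 ++ [st.2 + d], st.2 + d)) ([0], 0)).1

-- the while loop: s += sign * (prefix[min(start+r, n)] - prefix[start]); sign = -sign; start += 2*r
def blockSumB (pref : List Int) (n i : Nat) (start : Nat) (sign : Int) : Int :=
  if start < n then
    sign * (pref.getD (min (start + (i + 1)) n) 0 - pref.getD start 0)
      + blockSumB pref n i (start + 2 * (i + 1)) (-sign)
  else 0
termination_by n - start
decreasing_by omega

-- out.append(abs(s) % 10), for each i
def phaseB (digits : List Int) : List Int :=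
  let n := digits.length
  let pref := prefixB digits
  (List.range n).map (fun i => ((blockSumB pref n i i 1).natAbs % 10 : Int))

def loopB : Nat → List Int → List Int
  | 0, d => d
  | k + 1, d => loopB k (phaseB d)

def calc_digits_alt (digits : List Int) (count : Int) : String :=
  let final := loopB count.toNat digits
  PySem.Str.join "" ((PySem.List.slice final none (some 8)).map PySem.Int.toStr)

-- ===== PRECONDITION & SPEC =====
def Spec_calc_digits (digits : List Int) (count : Int) (out : String) : Prop := out = calc_digits_alt digits count
instance (digits : List Int) (count : Int) (out : String) : Decidable (Spec_calc_digits digits count out) := by unfold Spec_calc_digits; infer_instance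

-- ===== CLAIM (what is proved, stated in full; the proofs are below) =====
def Claim_equal_calc_digits : Prop := ∀ (digits : List Int) (count : Int), Dom_calc_digits digits count → Spec_calc_digits digits count (calc_digits digits count)

-- ===== LEMMAS AND PROOFS =====


theorem toDigitsCore_getLast? (f : Nat) : ∀ (n : Nat) (ds : List Char), 0 < f →
    (Nat.toDigitsCore 10 f n ds).getLast? = some (ds.getLastD (Nat.digitChar (n % 10))) := by
  induction f with
  | zero => intro n ds h; omega
  | succ f ih =>
    intro n ds _
    rw [Nat.toDigitsCore]
    by_cases h : n / 10 = 0
    · simp [h, List.getLast?_cons]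
    · simp only [h, if_false]
      rcases Nat.eq_zero_or_pos f with hf | hf
      · subst hf; rw [Nat.toDigitsCore]; simp [List.getLast?_cons]
      · rw [ih (n / 10) _ hf]
        cases ds <;> simp [List.getLastD_eq_getLast?, List.getLast?_cons]

theorem ofChars?_digitChar (k : Nat) (hk : k < 10) :
    PySem.Int.ofChars? [Nat.digitChar k] = some (k : Int) := by
  interval_cases k <;> decide

theorem lastDigit_eq (s : Int) :
    lastDigitA s = ((s.natAbs % 10 : Nat) : Int) := by
  rw [lastDigitA, PySem.List.pyGet?_neg_one]
  unfold PySem.Int.toChars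
  by_cases h : s < 0
  · simp only [h, if_true]
    rw [Nat.toDigits, List.getLast?_cons]
    rw [toDigitsCore_getLast? _ _ _ (by omega)]
    simp only [List.getLastD, Option.getD_some]
    rw [ofChars?_digitChar (s.natAbs % 10) (by omega)]
    rfl
  · simp only [h, if_false]
    rw [Nat.toDigits, toDigitsCore_getLast? _ _ _ (by omega)]
    simp only [List.getLastD]
    rw [ofChars?_digitChar (s.toNat % 10) (by omega)]
    have : s.toNat = s.natAbs := by omega
    rw [this]; rfl

theorem iter_step (t k : Nat) (ht : 0 < t) :
    iterNextA t ((k / t) % 4, k % t, patA ((k / t) % 4))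
      = ((((k+1) / t) % 4, (k+1) % t, patA (((k+1) / t) % 4)), patA (((k+1) / t) % 4)) := by
  unfold iterNextA
  by_cases h : k % t + 1 ≥ t
  · have hr : k % t = t - 1 := by have := Nat.mod_lt k ht; omega
    have e : k + 1 = t * (k / t) + t := by have := Nat.div_add_mod k t; omega
    have hd : (k + 1) / t = k / t + 1 := by
      rw [e, Nat.mul_add_div ht, Nat.div_self ht]
    have hm : (k + 1) % t = 0 := by rw [e, Nat.mul_add_mod, Nat.mod_self]
    simp only [h, if_true, hd, hm]
    have h4 : (k / t % 4 + 1) % 4 = (k / t + 1) % 4 := by omega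
    rw [h4]
  · have hlt : k % t + 1 < t := by omega
    have e : k + 1 = t * (k / t) + (k % t + 1) := by have := Nat.div_add_mod k t; omega
    have hd : (k + 1) / t = k / t := by
      rw [e, Nat.mul_add_div ht, Nat.div_eq_of_lt hlt]; omega
    have hm : (k + 1) % t = k % t + 1 := by
      rw [e, Nat.mul_add_mod, Nat.mod_eq_of_lt hlt]
    simp only [ge_iff_le, h, if_false, hd, hm]

theorem rowA_eq (copy : List Int) (i : Nat) :
    rowA copy i = ∑ j ∈ Finset.range copy.length,
      copy.getD j 0 * patA (((j + 1) / (i + 1)) % 4) := by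
  have key : ∀ m, (List.range m).foldl
      (fun (acc : Int × (Nat × Nat × Int)) j =>
        let r := iterNextA (i + 1) acc.2
        (acc.1 + copy.getD j 0 * r.2, r.1))
      (0, (0, 0, patA 0))
      = (∑ j ∈ Finset.range m, copy.getD j 0 * patA (((j + 1) / (i + 1)) % 4),
         ((m / (i + 1)) % 4, m % (i + 1), patA ((m / (i + 1)) % 4))) := by
    intro m
    induction m with
    | zero => simp
    | succ m ih =>
      rw [List.range_succ, List.foldl_append, ih, Finset.sum_range_succ]
      simp only [List.foldl_cons, List.foldl_nil]
      rw [iter_step (i + 1) m (by omega)]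
  rw [rowA, key]

def psums : List Int → Int → List Int
  | [], _ => []
  | d :: xs, a => (a + d) :: psums xs (a + d)

theorem foldl_psums (xs : List Int) : ∀ (p : List Int) (a : Int),
    (xs.foldl (fun (st : List Int × Int) d => (st.1 ++ [st.2 + d], st.2 + d)) (p, a)).1
      = p ++ psums xs a := by
  induction xs with
  | nil => intro p a; simp [psums]
  | cons d xs ih => intro p a; simp only [List.foldl_cons, psums, ih]; simp

theorem psums_getElem (xs : List Int) : ∀ (a : Int) (k : Nat) (_ : k < xs.length),
    (psums xs a).getD k 0 = a + ((xs.take (k + 1)).sum) := by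
  induction xs with
  | nil => intro a k hk; simp at hk
  | cons d xs ih =>
    intro a k hk
    cases k with
    | zero => simp [psums]
    | succ k =>
      simp only [psums, List.getD_cons_succ, List.take_succ_cons, List.sum_cons]
      rw [ih (a + d) k (by simpa using hk)]
      ring

theorem prefixB_getD (copy : List Int) (k : Nat) (hk : k ≤ copy.length) :
    (prefixB copy).getD k 0 = (copy.take k).sum := by
  rw [prefixB, foldl_psums]
  cases k with
  | zero => simp
  | succ k =>
    have : ([(0 : Int)] ++ psums copy 0).getD (k + 1) 0 = (psums copy 0).getD k 0 := by simp
    rw [this, psums_getElem copy 0 k (by omega)]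
    simp

theorem sum_take_eq (copy : List Int) : ∀ (b : Nat), b ≤ copy.length →
    (copy.take b).sum = ∑ j ∈ Finset.range b, copy.getD j 0 := by
  intro b hb
  induction b with
  | zero => simp
  | succ b ih =>
    rw [List.take_add_one, Finset.sum_range_succ, ← ih (by omega)]
    have : copy[b]?.toList = [copy.getD b 0] := by
      rw [List.getD_eq_getElem _ _ (by omega)]
      simp [List.getElem?_eq_getElem (by omega : b < copy.length)]
    simp [this]

theorem sum_Ico_getD (copy : List Int) (a b : Nat) (hab : a ≤ b) (hb : b ≤ copy.length) :
    ∑ j ∈ Finset.Ico a b, copy.getD j 0 = (copy.take b).sum - (copy.take a).sum := by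
  rw [sum_take_eq copy b hb, sum_take_eq copy a (by omega)]
  rw [Finset.range_eq_Ico,
    ← Finset.sum_Ico_consecutive (fun j => copy.getD j 0) (Nat.zero_le a) hab]
  ring

theorem patA_add_two (m : Nat) : patA ((m + 2) % 4) = -patA (m % 4) := by
  have h : m % 4 = 0 ∨ m % 4 = 1 ∨ m % 4 = 2 ∨ m % 4 = 3 := by omega
  rcases h with h | h | h | h <;>
    · have h2 : (m + 2) % 4 = (m % 4 + 2) % 4 := by omega
      rw [h2, h]; simp [patA]

theorem blockSum_eq (copy : List Int) (i : Nat) : ∀ (start : Nat) (sign : Int),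
    blockSumB (prefixB copy) copy.length i start sign
      = ∑ j ∈ Finset.Ico start copy.length,
          copy.getD j 0 * (sign * patA (((j - start) / (i + 1) + 1) % 4)) := by
  intro start sign
  induction start, sign using blockSumB.induct copy.length i with
  | case1 start sign h ih =>
    rw [blockSumB, if_pos h]
    set n := copy.length with hn
    set t := i + 1 with htdef
    have ht : 0 < t := by omega
    set m1 := min (start + t) n with hm1
    set m2 := min (start + 2 * t) n with hm2
    have hsm1 : start ≤ m1 := by omega
    have hm1m2 : m1 ≤ m2 := by omega
    have hm2n : m2 ≤ n := by omega
    rw [prefixB_getD copy m1 (by omega), prefixB_getD copy start (by omega)]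
    have hb1 : (copy.take m1).sum - (copy.take start).sum
        = ∑ j ∈ Finset.Ico start m1, copy.getD j 0 := by
      rw [sum_Ico_getD copy start m1 hsm1 (by omega)]
    rw [ih, hb1]
    have hsplit : ∑ j ∈ Finset.Ico start n,
          copy.getD j 0 * (sign * patA (((j - start) / t + 1) % 4))
        = (∑ j ∈ Finset.Ico start m1, copy.getD j 0 * (sign * patA (((j - start) / t + 1) % 4)))
          + (∑ j ∈ Finset.Ico m1 m2, copy.getD j 0 * (sign * patA (((j - start) / t + 1) % 4)))
          + (∑ j ∈ Finset.Ico m2 n, copy.getD j 0 * (sign * patA (((j - start) / t + 1) % 4))) := by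
      rw [← Finset.sum_Ico_consecutive
          (fun j => copy.getD j 0 * (sign * patA (((j - start) / t + 1) % 4)))
          hsm1 (le_trans hm1m2 hm2n),
        ← Finset.sum_Ico_consecutive
          (fun j => copy.getD j 0 * (sign * patA (((j - start) / t + 1) % 4)))
          hm1m2 hm2n]
      ring
    have h1 : ∑ j ∈ Finset.Ico start m1, copy.getD j 0 * (sign * patA (((j - start) / t + 1) % 4))
        = sign * ∑ j ∈ Finset.Ico start m1, copy.getD j 0 := by
      rw [Finset.mul_sum]
      refine Finset.sum_congr rfl (fun j hj => ?_)
      rw [Finset.mem_Ico] at hj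
      have hd : (j - start) / t = 0 := Nat.div_eq_of_lt (by omega)
      rw [hd]; simp [patA]; ring
    have h2 : ∑ j ∈ Finset.Ico m1 m2, copy.getD j 0 * (sign * patA (((j - start) / t + 1) % 4))
        = 0 := by
      refine Finset.sum_eq_zero (fun j hj => ?_)
      rw [Finset.mem_Ico] at hj
      have hd : (j - start) / t = 1 :=
        Nat.div_eq_of_lt_le (by omega) (by omega)
      rw [hd]; simp [patA]
    have h3 : ∑ j ∈ Finset.Ico m2 n, copy.getD j 0 * (sign * patA (((j - start) / t + 1) % 4))
        = ∑ j ∈ Finset.Ico (start + 2 * t) n,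
            copy.getD j 0 * (-sign * patA (((j - (start + 2 * t)) / t + 1) % 4)) := by
      by_cases hc : start + 2 * t ≤ n
      · have hm2e : m2 = start + 2 * t := by omega
        rw [hm2e]
        refine Finset.sum_congr rfl (fun j hj => ?_)
        rw [Finset.mem_Ico] at hj
        have e1 : j - start = (j - (start + 2 * t)) + 2 * t := by omega
        have e2 : (j - start) / t = (j - (start + 2 * t)) / t + 2 := by
          rw [e1, Nat.add_mul_div_right _ _ ht]
        rw [e2]
        have e3 : ((j - (start + 2 * t)) / t + 2 + 1) % 4
            = ((j - (start + 2 * t)) / t + 1 + 2) % 4 := by omega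
        rw [e3, patA_add_two ((j - (start + 2 * t)) / t + 1)]
        ring
      · have hm2e : m2 = n := by omega
        rw [hm2e, Finset.Ico_self, Finset.Ico_eq_empty (by omega)]
        simp
    rw [hsplit, h1, h2, h3]
    ring
  | case2 start sign h =>
    rw [blockSumB, if_neg h]
    rw [Finset.Ico_eq_empty (by omega)]
    simp

theorem foldl_set_range (f : Nat → Int) : ∀ (m : Nat) (d : List Int), m ≤ d.length →
    (List.range m).foldl (fun acc i => acc.set i (f i)) d = (List.range m).map f ++ d.drop m := by
  intro m
  induction m with
  | zero => intro d _; simp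
  | succ m ih =>
    intro d hm
    rw [List.range_succ, List.foldl_append, ih d (by omega)]
    simp only [List.foldl_cons, List.foldl_nil, List.map_append, List.map_cons, List.map_nil]
    have hlen : ((List.range m).map f).length = m := by simp
    rw [List.set_append, hlen]
    rw [if_neg (lt_irrefl m), Nat.sub_self,
      List.drop_eq_getElem_cons (by omega : m < d.length), List.set_cons_zero]
    simp

theorem bridge_sum (copy : List Int) (i : Nat) (hi : i < copy.length) :
    ∑ j ∈ Finset.range copy.length, copy.getD j 0 * patA (((j + 1) / (i + 1)) % 4)
      = ∑ j ∈ Finset.Ico i copy.length,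
          copy.getD j 0 * ((1 : Int) * patA (((j - i) / (i + 1) + 1) % 4)) := by
  rw [Finset.range_eq_Ico,
    ← Finset.sum_Ico_consecutive (fun j => copy.getD j 0 * patA (((j + 1) / (i + 1)) % 4))
      (Nat.zero_le i) (le_of_lt hi)]
  have h0 : ∑ j ∈ Finset.Ico 0 i, copy.getD j 0 * patA (((j + 1) / (i + 1)) % 4) = 0 := by
    refine Finset.sum_eq_zero (fun j hj => ?_)
    rw [Finset.mem_Ico] at hj
    rw [Nat.div_eq_of_lt (by omega)]
    simp [patA]
  rw [h0, zero_add]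
  refine Finset.sum_congr rfl (fun j hj => ?_)
  rw [Finset.mem_Ico] at hj
  have e : j + 1 = (j - i) + (i + 1) := by omega
  rw [e, Nat.add_div_right _ (by omega)]
  ring

theorem phaseA_eq_phaseB (d : List Int) : phaseA d = phaseB d := by
  unfold phaseA phaseB
  rw [foldl_set_range (fun i => lastDigitA (rowA d i)) d.length d (le_refl _),
    List.drop_length, List.append_nil]
  refine List.map_congr_left (fun i hi => ?_)
  rw [List.mem_range] at hi
  rw [lastDigit_eq, rowA_eq, bridge_sum d i hi, ← blockSum_eq]
  omega

theorem loopA_eq_loopB (k : Nat) (d : List Int) : loopA k d = loopB k d := by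
  induction k generalizing d with
  | zero => rfl
  | succ k ih => simp [loopA, loopB, ih, phaseA_eq_phaseB]

-- ===== VERDICT (by name: the statement is the Claim_ definition above) =====
theorem calc_digits_spec : Claim_equal_calc_digits := by
  intro digits count _
  unfold Spec_calc_digits calc_digits calc_digits_alt
  rw [loopA_eq_loopB]
  simp [PySem.List.slice_zero_start]
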